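-- pv_equiv track=rewrite | github.com/ehxhf789789/R02_LLM_CNT | scripts/run_experiment.py | classify_proposals
-- ===== SOURCE A (Python) =====
-- ACCURACY_CUTOFF_YEAR = 2018        # 정확도 분석 대상: 이 연도 이후 지정 기술
--
-- SENSITIVITY_YEAR_RANGE = (2013, 2017)  # 민감도 분석 대상: 이 연도 범위 지정 기술
--
-- def classify_proposals(proposals: dict[str, dict]) -> dict:
--     """프로포절을 실험 그룹별로 분류.
--
--     Returns:
--         {
--             "accuracy":    [...],  # 2018+ 기술 (검증 1: 정확도)
--             "consistency": [...],  # 전체 기술 (검증 2: 일관성)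
--             "sensitivity": [...],  # 2013-2017 기술 (검증 4: 민감도)
--         }
--     """
--     accuracy = []
--     consistency = []
--     sensitivity = []
--
--     for tech_num, p in proposals.items():
--         year = p.get("designation_year")
--         consistency.append(tech_num)
--
--         if year and int(year) >= ACCURACY_CUTOFF_YEAR:
--             accuracy.append(tech_num)
--
--         if year and SENSITIVITY_YEAR_RANGE[0] <= int(year) <= SENSITIVITY_YEAR_RANGE[1]:
--             sensitivity.append(tech_num)
--
--     return {
--         "accuracy": sorted(accuracy, key=lambda x: int(x) if x.isdigit() else 0),
--         "consistency": sorted(consistency, key=lambda x: int(x) if x.isdigit() else 0),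
--         "sensitivity": sorted(sensitivity, key=lambda x: int(x) if x.isdigit() else 0),
--     }
-- ===== SOURCE B (Python) =====
-- ACCURACY_CUTOFF_YEAR = 2018
--
-- SENSITIVITY_YEAR_RANGE = (2013, 2017)
--
--
-- def classify_proposals(proposals: dict[str, dict]) -> dict:
--     """Bucket sort instead of comparison sorts: group the items into a dict of
--     buckets keyed by their numeric sort key, then walk the distinct keys in
--     increasing order, classifying each bucket's items on the way."""
--     buckets = {}
--     for tech_num, p in proposals.items():
--         k = int(tech_num) if tech_num.isdigit() else 0
--         buckets.setdefault(k, []).append((tech_num, p.get("designation_year")))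
--
--     accuracy = []
--     consistency = []
--     sensitivity = []
--     for k in sorted(buckets):
--         for tech_num, year in buckets[k]:
--             consistency.append(tech_num)
--             if year and int(year) >= ACCURACY_CUTOFF_YEAR:
--                 accuracy.append(tech_num)
--             if year and SENSITIVITY_YEAR_RANGE[0] <= int(year) <= SENSITIVITY_YEAR_RANGE[1]:
--                 sensitivity.append(tech_num)
--
--     return {
--         "accuracy": accuracy,
--         "consistency": consistency,
--         "sensitivity": sensitivity,
--     }
-- ===== Notes on version B (the rewrite author's own statement) =====
-- stated objective: alternative
-- what changed: A partitions the items into three lists and comparison-sorts each of the three by the numeric key; B does a bucket sort: it groups the items into a dict of buckets keyed by the numeric key, sorts only the distinct keys, and classifies each bucket's items while walking the keys in increasing order, so the items themselves are never comparison-sorted.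
import Mathlib
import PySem

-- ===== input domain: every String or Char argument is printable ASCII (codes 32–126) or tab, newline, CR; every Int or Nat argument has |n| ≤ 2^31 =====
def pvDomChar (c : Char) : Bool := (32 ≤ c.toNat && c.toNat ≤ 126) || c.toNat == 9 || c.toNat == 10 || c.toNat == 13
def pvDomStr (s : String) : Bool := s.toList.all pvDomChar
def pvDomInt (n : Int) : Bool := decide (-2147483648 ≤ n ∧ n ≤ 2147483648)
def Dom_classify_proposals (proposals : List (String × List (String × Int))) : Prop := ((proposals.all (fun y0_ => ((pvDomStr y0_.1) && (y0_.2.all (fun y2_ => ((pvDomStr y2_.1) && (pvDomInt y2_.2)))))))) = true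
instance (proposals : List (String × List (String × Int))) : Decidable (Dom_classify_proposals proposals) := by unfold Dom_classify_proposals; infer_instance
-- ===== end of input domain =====

-- B replaces A's partition-then-three-comparison-sorts by a bucket sort: items are grouped
-- into a dict of buckets by their numeric key, only the distinct keys are sorted, and the
-- buckets are classified while walking the keys in increasing order (alternative algorithm).


-- ===== PORT A =====
-- the loop keeps the three accumulators (accuracy, consistency, sensitivity);
-- 'year and int(year) >= c' (truthiness of the Optional year) is Option.elim false (y ≠ 0 && c ≤ y)
def classify_proposals (proposals : List (String × List (String × Int))) : List (String × List String) :=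
  let st := proposals.foldl
    (fun (st : List String × List String × List String) kv =>
      let year := PySem.Dict.get? ⟨kv.2⟩ "designation_year"
      (if year.elim false (fun y => y != 0 && decide (2018 ≤ y))
       then st.1 ++ [kv.1] else st.1,
       st.2.1 ++ [kv.1],
       if year.elim false (fun y => y != 0 && decide (2013 ≤ y) && decide (y ≤ 2017))
       then st.2.2 ++ [kv.1] else st.2.2))
    ([], [], [])
  [("accuracy", PySem.List.sorted st.1 (fun x => if PySem.Str.strIsdigit x then (PySem.Int.ofStr? x).getD 0 else 0) false),
   ("consistency", PySem.List.sorted st.2.1 (fun x => if PySem.Str.strIsdigit x then (PySem.Int.ofStr? x).getD 0 else 0) false),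
   ("sensitivity", PySem.List.sorted st.2.2 (fun x => if PySem.Str.strIsdigit x then (PySem.Int.ofStr? x).getD 0 else 0) false)]

-- ===== PORT B =====
-- Source B's bucket key 'int(tech_num) if tech_num.isdigit() else 0'
def pvKey (x : String) : Int :=
  if PySem.Str.strIsdigit x then (PySem.Int.ofStr? x).getD 0 else 0

-- Source B's bucket item '(tech_num, p.get("designation_year"))'
def pvItem (kv : String × List (String × Int)) : String × Option Int :=
  (kv.1, PySem.Dict.get? ⟨kv.2⟩ "designation_year")

def classify_proposals_alt (proposals : List (String × List (String × Int))) : List (String × List String) :=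
  -- buckets.setdefault(k, []).append(item)  ==  buckets[k] = buckets.get(k, []) + [item]  ==  Dict.modify
  let buckets : PySem.Dict Int (List (String × Option Int)) :=
    proposals.foldl
      (fun d kv => PySem.Dict.modify d (pvKey kv.1) [] (fun b => b ++ [pvItem kv]))
      PySem.Dict.empty
  -- for k in sorted(buckets): for tech_num, year in buckets[k]: …
  -- (buckets[k] never raises here since k is drawn from buckets' keys: getD is exact)
  let st := (PySem.List.sorted (PySem.Dict.keys buckets) (fun k => k) false).foldl
    (fun (st : List String × List String × List String) k =>
      (PySem.Dict.getD buckets k []).foldl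
        (fun (st : List String × List String × List String) it =>
          (if it.2.elim false (fun y => y != 0 && decide (2018 ≤ y))
           then st.1 ++ [it.1] else st.1,
           st.2.1 ++ [it.1],
           if it.2.elim false (fun y => y != 0 && decide (2013 ≤ y) && decide (y ≤ 2017))
           then st.2.2 ++ [it.1] else st.2.2))
        st)
    ([], [], [])
  [("accuracy", st.1), ("consistency", st.2.1), ("sensitivity", st.2.2)]

-- ===== PRECONDITION & SPEC =====
def Spec_classify_proposals (proposals : List (String × List (String × Int))) (out : List (String × List String)) : Prop := out = classify_proposals_alt proposals
instance (proposals : List (String × List (String × Int))) (out : List (String × List String)) : Decidable (Spec_classify_proposals proposals out) := by unfold Spec_classify_proposals; infer_instance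

-- ===== CLAIM (what is proved, stated in full; the proofs are below) =====
def Claim_equal_classify_proposals : Prop := ∀ (proposals : List (String × List (String × Int))), Dom_classify_proposals proposals → Spec_classify_proposals proposals (classify_proposals proposals)

-- ===== LEMMAS AND PROOFS =====

-- the classification fold computes the three append-filtered lists
theorem pv_loopA {α : Type} (l : List (String × α)) (fA fS : α → Bool)
    (a c s : List String) :
    l.foldl (fun (st : List String × List String × List String) kv =>
        (if fA kv.2 then st.1 ++ [kv.1] else st.1,
         st.2.1 ++ [kv.1],
         if fS kv.2 then st.2.2 ++ [kv.1] else st.2.2)) (a, c, s)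
    = (a ++ (l.filter (fun kv => fA kv.2)).map (fun kv => kv.1),
       c ++ l.map (fun kv => kv.1),
       s ++ (l.filter (fun kv => fS kv.2)).map (fun kv => kv.1)) := by
  induction l generalizing a c s with
  | nil => simp
  | cons x t ih =>
    simp only [List.foldl_cons, ih, List.filter_cons, List.map_cons]
    by_cases hA : fA x.2 <;> by_cases hS : fS x.2 <;> simp [hA, hS]

-- a fold of an inner fold over buckets is the fold over the concatenation
theorem pv_foldl_flatMap {α β σ : Type} (K : List β) (g : β → List α)
    (f : σ → α → σ) (init : σ) :
    K.foldl (fun st k => (g k).foldl f st) init = (K.flatMap g).foldl f init := by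
  induction K generalizing init with
  | nil => rfl
  | cons k t ih => simp [List.flatMap_cons, List.foldl_append, ih]

-- flatMap congruence on members
theorem pv_flatMap_congr {α β : Type} (K : List β) (g h : β → List α)
    (hgh : ∀ k ∈ K, g k = h k) : K.flatMap g = K.flatMap h := by
  induction K with
  | nil => rfl
  | cons k t ih =>
    simp only [List.flatMap_cons, hgh k List.mem_cons_self,
      ih (fun k' hk' => hgh k' (List.mem_cons_of_mem _ hk'))]

-- filtering through one stable insertion (accumulator sorted by key)
theorem pv_filter_insertBy {α : Type} (key : α → Int) (p : α → Bool) (x : α)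
    (ys : List α) (h : ys.Pairwise (fun a b => key a ≤ key b)) :
    (PySem.List.insertBy (fun a b => decide (key a < key b)) x ys).filter p
    = if p x then PySem.List.insertBy (fun a b => decide (key a < key b)) x (ys.filter p)
      else ys.filter p := by
  induction ys with
  | nil => by_cases hpx : p x <;> simp [PySem.List.insertBy, hpx]
  | cons y t ih =>
    rcases List.pairwise_cons.mp h with ⟨hy, ht⟩
    by_cases hlt : key x < key y
    · have hins : PySem.List.insertBy (fun a b => decide (key a < key b)) x (y :: t)
          = x :: y :: t := by simp [PySem.List.insertBy, hlt]
      rw [hins]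
      by_cases hpx : p x
      · simp only [List.filter_cons, hpx, if_true]
        by_cases hpy : p y
        · simp [hpy, PySem.List.insertBy, hlt]
        · simp only [hpy, Bool.false_eq_true, if_false]
          cases hft : t.filter p with
          | nil => simp [PySem.List.insertBy]
          | cons z zs =>
            have hz : z ∈ t := List.mem_of_mem_filter (hft ▸ List.mem_cons_self)
            have hxz : key x < key z := lt_of_lt_of_le hlt (hy z hz)
            simp [PySem.List.insertBy, hxz]
      · simp [List.filter_cons, hpx]
    · have hins : PySem.List.insertBy (fun a b => decide (key a < key b)) x (y :: t)
          = y :: PySem.List.insertBy (fun a b => decide (key a < key b)) x t := by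
        simp [PySem.List.insertBy, hlt]
      rw [hins]
      by_cases hpy : p y
      · by_cases hpx : p x <;>
          simp [hpy, hpx, ih ht, PySem.List.insertBy, hlt]
      · by_cases hpx : p x <;>
          simp [hpy, hpx, ih ht]

-- stable insertion preserves key-sortedness of the accumulator
theorem pv_pairwise_insertBy {α : Type} (key : α → Int) (x : α) (ys : List α)
    (h : ys.Pairwise (fun a b => key a ≤ key b)) :
    (PySem.List.insertBy (fun a b => decide (key a < key b)) x ys).Pairwise
      (fun a b => key a ≤ key b) := by
  induction ys with
  | nil => simp [PySem.List.insertBy]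
  | cons y t ih =>
    rcases List.pairwise_cons.mp h with ⟨hy, ht⟩
    by_cases hlt : key x < key y
    · have hins : PySem.List.insertBy (fun a b => decide (key a < key b)) x (y :: t)
          = x :: y :: t := by simp [PySem.List.insertBy, hlt]
      rw [hins]
      refine List.pairwise_cons.mpr ⟨?_, h⟩
      intro b hb
      rcases List.mem_cons.mp hb with rfl | hb
      · exact le_of_lt hlt
      · exact le_of_lt (lt_of_lt_of_le hlt (hy b hb))
    · have hins : PySem.List.insertBy (fun a b => decide (key a < key b)) x (y :: t)
          = y :: PySem.List.insertBy (fun a b => decide (key a < key b)) x t := by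
        simp [PySem.List.insertBy, hlt]
      rw [hins]
      refine List.pairwise_cons.mpr ⟨?_, ih ht⟩
      intro b hb
      rcases (PySem.List.mem_insertBy _ _ _ _).mp hb with rfl | hb
      · exact le_of_not_gt hlt
      · exact hy b hb

-- filter commutes with the sort's foldl (accumulator sorted)
theorem pv_filter_foldl {α : Type} (key : α → Int) (p : α → Bool) (l acc : List α)
    (h : acc.Pairwise (fun a b => key a ≤ key b)) :
    (l.foldl (fun acc x => PySem.List.insertBy (fun a b => decide (key a < key b)) x acc) acc).filter p
    = (l.filter p).foldl (fun acc x => PySem.List.insertBy (fun a b => decide (key a < key b)) x acc) (acc.filter p) := by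
  induction l generalizing acc with
  | nil => simp
  | cons x t ih =>
    simp only [List.foldl_cons, List.filter_cons]
    rw [ih _ (pv_pairwise_insertBy key x acc h), pv_filter_insertBy key p x acc h]
    by_cases hpx : p x <;> simp [hpx]

-- filter commutes with a stable sort
theorem pv_filter_sorted {α : Type} (key : α → Int) (p : α → Bool) (l : List α) :
    (PySem.List.sorted l key false).filter p
    = PySem.List.sorted (l.filter p) key false := by
  rw [PySem.List.sorted_eq_foldl_insertBy, PySem.List.sorted_eq_foldl_insertBy]
  simpa using pv_filter_foldl key p l [] List.Pairwise.nil

-- insertion commutes with mapping a key-factoring projection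
theorem pv_insertBy_map {α β : Type} (key : β → Int) (f : α → β) (x : α) (ys : List α) :
    (PySem.List.insertBy (fun a b => decide (key (f a) < key (f b))) x ys).map f
    = PySem.List.insertBy (fun a b => decide (key a < key b)) (f x) (ys.map f) := by
  induction ys with
  | nil => simp [PySem.List.insertBy]
  | cons y t ih =>
    by_cases hlt : key (f x) < key (f y) <;>
      simp [PySem.List.insertBy, hlt, ih]

-- sorting a projected list = projecting the sorted list
theorem pv_sorted_map {α β : Type} (key : β → Int) (f : α → β) (l : List α) :
    PySem.List.sorted (l.map f) key false
    = (PySem.List.sorted l (fun x => key (f x)) false).map f := by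
  rw [PySem.List.sorted_eq_foldl_insertBy, PySem.List.sorted_eq_foldl_insertBy]
  suffices h : ∀ (acc : List α),
      (l.map f).foldl (fun acc x => PySem.List.insertBy (fun a b => decide (key a < key b)) x acc) (acc.map f)
      = (l.foldl (fun acc x => PySem.List.insertBy (fun a b => decide (key (f a) < key (f b))) x acc) acc).map f by
    simpa using h []
  induction l with
  | nil => simp
  | cons x t ih =>
    intro acc
    simp only [List.map_cons, List.foldl_cons]
    rw [← pv_insertBy_map key f x acc, ih]

-- a key-sorted list splits as "bucket of the minimal key, then the rest"
theorem pv_split {α : Type} (key : α → Int) (k : Int) (s : List α)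
    (hs : s.Pairwise (fun a b => key a ≤ key b)) (hlb : ∀ x ∈ s, k ≤ key x) :
    s.filter (fun x => key x == k) ++ s.filter (fun x => !(key x == k)) = s := by
  induction s with
  | nil => rfl
  | cons x t ih =>
    rcases List.pairwise_cons.mp hs with ⟨hx, ht⟩
    by_cases hk : key x = k
    · have h1 : (key x == k) = true := by simpa using hk
      simp only [List.filter_cons, h1, Bool.not_true, if_true, Bool.false_eq_true, if_false,
        List.cons_append]
      rw [ih ht (fun y hy => hlb y (List.mem_cons_of_mem _ hy))]
    · have hxk : k < key x := lt_of_le_of_ne (hlb x List.mem_cons_self) (Ne.symm hk)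
      have h1 : (key x == k) = false := by simpa using hk
      have h2 : t.filter (fun y => key y == k) = [] := by
        apply List.filter_eq_nil_iff.mpr
        intro y hy
        have : k < key y := lt_of_lt_of_le hxk (hx y hy)
        simp; omega
      have h3 : t.filter (fun y => !(key y == k)) = t := by
        apply List.filter_eq_self.mpr
        intro y hy
        have : k < key y := lt_of_lt_of_le hxk (hx y hy)
        simp; omega
      simp [h1, h2, h3]

-- a key-sorted list is the concatenation, over the sorted distinct keys, of its key-buckets
theorem pv_bucket_decomp {α : Type} (key : α → Int) (K : List Int) (s : List α)
    (hs : s.Pairwise (fun a b => key a ≤ key b)) (hK : K.Pairwise (· < ·))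
    (hmem : ∀ x ∈ s, key x ∈ K) :
    K.flatMap (fun k => s.filter (fun x => key x == k)) = s := by
  induction K generalizing s with
  | nil =>
    cases s with
    | nil => rfl
    | cons x t => exact absurd (hmem x List.mem_cons_self) (List.not_mem_nil)
  | cons k K' ih =>
    rcases List.pairwise_cons.mp hK with ⟨hk, hK'⟩
    have hlb : ∀ x ∈ s, k ≤ key x := by
      intro x hxs
      rcases List.mem_cons.mp (hmem x hxs) with h | h
      · exact le_of_eq h.symm
      · exact le_of_lt (hk _ h)
    have hsplit := pv_split key k s hs hlb
    set t := s.filter (fun x => !(key x == k)) with ht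
    have htp : t.Pairwise (fun a b => key a ≤ key b) := hs.filter _
    have htmem : ∀ x ∈ t, key x ∈ K' := by
      intro x hxt
      have hxs : x ∈ s := List.mem_of_mem_filter hxt
      have hne : ¬ (key x == k) = true := by
        have := List.of_mem_filter hxt
        simpa using this
      rcases List.mem_cons.mp (hmem x hxs) with h | h
      · exact absurd (by simpa using h) hne
      · exact h
    have hrest : K'.flatMap (fun k' => s.filter (fun x => key x == k'))
        = K'.flatMap (fun k' => t.filter (fun x => key x == k')) := by
      apply pv_flatMap_congr
      intro k' hk'
      have hkk' : k < k' := hk _ hk'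
      rw [ht, List.filter_filter]
      apply List.filter_congr
      intro x _
      by_cases hx : key x = k'
      · simp [hx]; omega
      · simp [hx]
    rw [List.flatMap_cons, hrest, ih t htp hK' htmem, hsplit]

-- the bucket dict's lookups: bucket k holds exactly the key-k items, in input order
theorem pv_buckets_getD (l : List (String × List (String × Int))) (k : Int) :
    PySem.Dict.getD
      (l.foldl (fun d kv => PySem.Dict.modify d (pvKey kv.1) [] (fun b => b ++ [pvItem kv]))
        PySem.Dict.empty) k []
    = (l.filter (fun kv => pvKey kv.1 == k)).map pvItem := by
  have h : l.foldl (fun d kv => PySem.Dict.modify d (pvKey kv.1) [] (fun b => b ++ [pvItem kv]))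
        PySem.Dict.empty
      = (l.map (fun kv => (pvKey kv.1, pvItem kv))).foldl
          (fun d p => PySem.Dict.modify d p.1 [] (fun b => b ++ [p.2])) PySem.Dict.empty := by
    rw [List.foldl_map]
  rw [h, PySem.Dict.getD_foldl_modify_append]
  rw [List.filter_map]
  simp [Function.comp_def, List.map_map]

-- the bucket dict's keys: the distinct keys of l, first occurrences in order
theorem pv_buckets_keys (l : List (String × List (String × Int))) :
    PySem.Dict.keys
      (l.foldl (fun d kv => PySem.Dict.modify d (pvKey kv.1) [] (fun b => b ++ [pvItem kv]))
        PySem.Dict.empty)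
    = PySem.Set.ofList (l.map (fun kv => pvKey kv.1)) := by
  rw [PySem.Dict.keys_foldl_modify_key]
  simp [PySem.Set.update, PySem.Set.ofList_eq_foldl, PySem.Dict.keys_empty]

-- ===== VERDICT (by name: the statement is the Claim_ definition above) =====
set_option maxHeartbeats 2000000 in
theorem classify_proposals_spec : Claim_equal_classify_proposals := by
  intro l _
  show _ = _
  unfold classify_proposals classify_proposals_alt
  simp only []
  -- A's side in normal form
  rw [pv_loopA l
      (fun p => (PySem.Dict.get? ⟨p⟩ "designation_year").elim false (fun y => y != 0 && decide (2018 ≤ y)))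
      (fun p => (PySem.Dict.get? ⟨p⟩ "designation_year").elim false (fun y => y != 0 && decide (2013 ≤ y) && decide (y ≤ 2017)))
      [] [] []]
  -- B's side: flatten the nested fold, characterize the buckets
  rw [pv_foldl_flatMap]
  rw [pv_flatMap_congr _ _ _ (fun k _ => pv_buckets_getD l k), pv_buckets_keys]
  -- the flattened traversal is the stably key-sorted item list
  have hG : (PySem.List.sorted (PySem.Set.ofList (l.map (fun kv => pvKey kv.1))) (fun k => k) false).flatMap
        (fun k => (l.filter (fun kv => pvKey kv.1 == k)).map pvItem)
      = (PySem.List.sorted l (fun kv => pvKey kv.1) false).map pvItem := by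
    have h1 : ∀ k, (l.filter (fun kv => pvKey kv.1 == k)).map pvItem
        = ((PySem.List.sorted l (fun kv => pvKey kv.1) false).filter
            (fun kv => pvKey kv.1 == k)).map pvItem := by
      intro k
      rw [pv_filter_sorted (fun kv => pvKey kv.1) (fun kv => pvKey kv.1 == k) l]
      congr 1
      apply (PySem.List.sorted_eq_self_of_pairwise _ _ ?_).symm
      apply List.pairwise_of_forall_mem_list
      intro a ha b hb
      have ha' := List.of_mem_filter ha
      have hb' := List.of_mem_filter hb
      simp only [beq_iff_eq] at ha' hb'
      omega
    rw [pv_flatMap_congr _ _ _ (fun k _ => h1 k)]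
    rw [← List.map_flatMap]
    have hd := pv_bucket_decomp (fun kv : String × List (String × Int) => pvKey kv.1)
      (PySem.List.sorted (PySem.Set.ofList (l.map (fun kv => pvKey kv.1))) (fun k => k) false)
      (PySem.List.sorted l (fun kv => pvKey kv.1) false)
      (PySem.List.sorted_pairwise _ _)
      (PySem.List.sorted_ofList_pairwise_lt _)
      (by
        intro x hx
        rw [PySem.List.mem_sorted] at hx ⊢
        rw [PySem.Set.mem_ofList]
        exact List.mem_map_of_mem hx)
    rw [hd]
  rw [hG]
  -- B's classification pass over the sorted items
  rw [pv_loopA ((PySem.List.sorted l (fun kv => pvKey kv.1) false).map pvItem)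
      (fun y? => y?.elim false (fun y => y != 0 && decide (2018 ≤ y)))
      (fun y? => y?.elim false (fun y => y != 0 && decide (2013 ≤ y) && decide (y ≤ 2017)))
      [] [] []]
  -- align the three components
  rw [List.filter_map, List.filter_map]
  simp only [List.nil_append, List.map_map]
  rw [pv_sorted_map (fun x => if PySem.Str.strIsdigit x then (PySem.Int.ofStr? x).getD 0 else 0)
        (fun kv : String × List (String × Int) => kv.1),
      pv_sorted_map (fun x => if PySem.Str.strIsdigit x then (PySem.Int.ofStr? x).getD 0 else 0)
        (fun kv : String × List (String × Int) => kv.1),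
      pv_sorted_map (fun x => if PySem.Str.strIsdigit x then (PySem.Int.ofStr? x).getD 0 else 0)
        (fun kv : String × List (String × Int) => kv.1),
      ← pv_filter_sorted (fun kv : String × List (String × Int) => if PySem.Str.strIsdigit kv.1 then (PySem.Int.ofStr? kv.1).getD 0 else 0)
        (fun kv => (PySem.Dict.get? ⟨kv.2⟩ "designation_year").elim false (fun y => y != 0 && decide (2018 ≤ y))) l,
      ← pv_filter_sorted (fun kv : String × List (String × Int) => if PySem.Str.strIsdigit kv.1 then (PySem.Int.ofStr? kv.1).getD 0 else 0)
        (fun kv => (PySem.Dict.get? ⟨kv.2⟩ "designation_year").elim false (fun y => y != 0 && decide (2013 ≤ y) && decide (y ≤ 2017))) l]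
  simp [pvItem, Function.comp_def, pvKey]
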